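-- pv_equiv track=rewrite | github.com/cudmore/SanPy | sanpy/detectionUtils.py | reduceByRefractory
-- ===== SOURCE A (Python) =====
-- from typing import List, Union, Optional  # Callable, Iterator, Optional
--
-- def reduceByRefractory(spikeTimes: List[int], refractoryPnts: int):
--     """If there are fast-spikes, throw-out the second one.
--
--     Args:
--     spikeTimes: list of spike time threshold crossing
--     refractoryPnts:
--     """
--
--     # refractory_ms = 20 #10 # remove spike [i] if it occurs within refractory_ms of spike [i-1]
--
--     spikeTimes = spikeTimes.copy()  # make a copy of the list, we are modifying it
--
--     lastGood = 0  # first spike [0] will always be good, there is no spike [i-1]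
--     for i in range(len(spikeTimes)):
--         if i == 0:
--             # first spike is always good
--             continue
--         dPoints = spikeTimes[i] - spikeTimes[lastGood]
--         if dPoints < refractoryPnts:
--             # remove spike time [i]
--             spikeTimes[i] = 0
--         else:
--             # spike time [i] was good
--             lastGood = i
--
--     # regenerate spikeTimes0 by throwing out any spike time that does not pass 'if spikeTime'
--     # spikeTimes[i] that were set to 0 above (they were too close to the previous spike)
--     newSpikeTimes = [spikeTime for spikeTime in spikeTimes if spikeTime]
--     return newSpikeTimes
-- ===== SOURCE B (Python) =====
-- def reduceByRefractory(spikeTimes, refractoryPnts):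
--     """Keep a spike iff it is the first one, or it occurs at least
--     refractoryPnts after the last kept spike. Builds the result directly;
--     does not mutate the input."""
--     accepted = []
--     for t in spikeTimes:
--         if not accepted or t - accepted[-1] >= refractoryPnts:
--             accepted.append(t)
--     return accepted
-- ===== Notes on version B (the rewrite author's own statement) =====
-- stated objective: simpler
-- what changed: B builds the accepted list directly, comparing each spike to the last kept value, instead of copying the list, zeroing rejected entries by index via a tracked lastGood index, and filtering truthy values in a second pass.
-- intended difference: On inputs where the refractory rule accepts a spike whose time equals 0, A silently drops that accepted zero-valued spike from its output (an artefact of its zero-sentinel-plus-truthy-filter scheme), while B returns every accepted spike including 0, which is a perfectly valid spike time. — e.g. on reduceByRefractory([0, 10], 5): A returns [10], B returns [0, 10]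
import Mathlib
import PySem

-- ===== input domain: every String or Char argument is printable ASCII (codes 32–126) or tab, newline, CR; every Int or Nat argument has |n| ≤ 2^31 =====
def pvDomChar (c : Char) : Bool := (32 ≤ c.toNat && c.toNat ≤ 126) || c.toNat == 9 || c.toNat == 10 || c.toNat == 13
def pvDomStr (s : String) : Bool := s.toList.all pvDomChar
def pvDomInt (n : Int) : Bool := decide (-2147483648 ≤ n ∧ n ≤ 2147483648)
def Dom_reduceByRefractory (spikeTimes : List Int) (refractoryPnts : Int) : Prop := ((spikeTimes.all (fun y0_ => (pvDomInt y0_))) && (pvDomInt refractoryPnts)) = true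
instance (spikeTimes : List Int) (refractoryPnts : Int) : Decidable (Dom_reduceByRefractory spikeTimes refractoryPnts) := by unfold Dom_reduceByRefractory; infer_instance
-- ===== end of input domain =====

-- B builds the accepted list directly, comparing each spike to the last kept value
-- (objective: simpler; no copy, no index tracking, no zeroing, no second filter pass).

-- ===== PORT A =====
-- loop body of A's for-loop: state is (the mutable copy of spikeTimes, lastGood index);
-- indices i and lastGood are always in range, so pyGetD's default 0 is never used.
def stepA (refractoryPnts : Int) (s : List Int × Int) (i : Int) : List Int × Int :=
  if i == 0 then s
  else
    let dPoints := PySem.List.pyGetD s.1 i 0 - PySem.List.pyGetD s.1 s.2 0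
    if dPoints < refractoryPnts then (s.1.set i.toNat 0, s.2) else (s.1, i)

def reduceByRefractory (spikeTimes : List Int) (refractoryPnts : Int) : List Int :=
  let st := (PySem.List.pyRange 0 (spikeTimes.length : Int) 1).foldl
              (stepA refractoryPnts) (spikeTimes, 0)
  st.1.filter (fun t => t ≠ 0)

-- ===== PORT B =====
-- B's for-loop: accepted spikes so far; accept t when the list is empty or
-- t - accepted[-1] >= refractoryPnts.
def stepB (refractoryPnts : Int) (acc : List Int) (t : Int) : List Int :=
  match acc.getLast? with
  | none => acc ++ [t]
  | some last => if refractoryPnts ≤ t - last then acc ++ [t] else acc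

def reduceByRefractory_alt (spikeTimes : List Int) (refractoryPnts : Int) : List Int :=
  spikeTimes.foldl (stepB refractoryPnts) []

-- ===== PRECONDITION & SPEC =====
-- On inputs where the refractory rule accepts a spike whose time is 0, A silently drops
-- that accepted zero-valued spike from its output (an artefact of its zero-sentinel-plus-
-- truthy-filter scheme), while B returns every accepted spike including 0, a perfectly
-- valid spike time.  acceptsZero r last ts: scanning ts with last accepted value `last`,
-- the refractory rule accepts some spike equal to 0 (a condition on the input only; it
-- computes no output of either program).
def acceptsZero (r : Int) (last : Int) : List Int → Bool
  | [] => false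
  | t :: ts => if r ≤ t - last then (t == 0 || acceptsZero r t ts) else acceptsZero r last ts

def D_reduceByRefractory (spikeTimes : List Int) (refractoryPnts : Int) : Prop :=
  (match spikeTimes with
   | [] => false
   | t0 :: rest => (t0 == 0 || acceptsZero refractoryPnts t0 rest)) = true
instance (spikeTimes : List Int) (refractoryPnts : Int) : Decidable (D_reduceByRefractory spikeTimes refractoryPnts) := by unfold D_reduceByRefractory; infer_instance

def Spec_reduceByRefractory (spikeTimes : List Int) (refractoryPnts : Int) (out : List Int) : Prop := ¬ D_reduceByRefractory spikeTimes refractoryPnts → out = reduceByRefractory_alt spikeTimes refractoryPnts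
instance (spikeTimes : List Int) (refractoryPnts : Int) (out : List Int) : Decidable (Spec_reduceByRefractory spikeTimes refractoryPnts out) := by unfold Spec_reduceByRefractory; infer_instance

def pvDiffWitness_reduceByRefractory : List Int × Int := ([0, 10], 5)
def pvDiffWitnessOut_reduceByRefractory : (List Int) × (List Int) := ([10], [0, 10])

-- ===== CLAIM (what is proved, stated in full; the proofs are below) =====
def Claim_unchanged_reduceByRefractory : Prop := ∀ (spikeTimes : List Int) (refractoryPnts : Int), Dom_reduceByRefractory spikeTimes refractoryPnts → Spec_reduceByRefractory spikeTimes refractoryPnts (reduceByRefractory spikeTimes refractoryPnts)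
def Claim_changed_reduceByRefractory : Prop := Dom_reduceByRefractory (pvDiffWitness_reduceByRefractory.1) (pvDiffWitness_reduceByRefractory.2) ∧ D_reduceByRefractory (pvDiffWitness_reduceByRefractory.1) (pvDiffWitness_reduceByRefractory.2) ∧ reduceByRefractory (pvDiffWitness_reduceByRefractory.1) (pvDiffWitness_reduceByRefractory.2) = pvDiffWitnessOut_reduceByRefractory.1 ∧ reduceByRefractory_alt (pvDiffWitness_reduceByRefractory.1) (pvDiffWitness_reduceByRefractory.2) = pvDiffWitnessOut_reduceByRefractory.2 ∧ pvDiffWitnessOut_reduceByRefractory.1 ≠ pvDiffWitnessOut_reduceByRefractory.2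
def Claim_exact_reduceByRefractory : Prop := ∀ (spikeTimes : List Int) (refractoryPnts : Int), Dom_reduceByRefractory spikeTimes refractoryPnts → D_reduceByRefractory spikeTimes refractoryPnts → reduceByRefractory spikeTimes refractoryPnts ≠ reduceByRefractory_alt spikeTimes refractoryPnts

-- ===== LEMMAS AND PROOFS =====

-- tail-recursive view of B after the head has been accepted (lg = last accepted value)
def altLoop (r lg : Int) : List Int → List Int
  | [] => []
  | t :: ts => if r ≤ t - lg then t :: altLoop r t ts else altLoop r lg ts

-- B's foldl over a nonempty accumulator is the accumulator followed by altLoop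
lemma foldlB_eq (r : Int) : ∀ (rest acc : List Int) (lg : Int), acc.getLast? = some lg →
    rest.foldl (stepB r) acc = acc ++ altLoop r lg rest := by
  intro rest
  induction rest with
  | nil => intro acc lg _; simp [altLoop]
  | cons t ts ih =>
    intro acc lg hlast
    rw [List.foldl_cons, altLoop]
    by_cases h : r ≤ t - lg
    · rw [if_pos h]
      have : stepB r acc t = acc ++ [t] := by simp [stepB, hlast, h]
      rw [this, ih (acc ++ [t]) t (by simp)]
      simp
    · rw [if_neg h]
      have : stepB r acc t = acc := by simp [stepB, hlast, h]
      rw [this, ih acc lg hlast]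

-- closed form of B
lemma altB (r : Int) : ∀ t0 rest, reduceByRefractory_alt (t0 :: rest) r = t0 :: altLoop r t0 rest := by
  intro t0 rest
  unfold reduceByRefractory_alt
  rw [List.foldl_cons]
  have hs : stepB r [] t0 = [t0] := by simp [stepB]
  rw [hs, foldlB_eq r rest [t0] t0 (by simp)]
  simp

-- Invariant of A's loop from index pre.length on: the eventual filtered result is
-- filter pre followed by the nonzero accepted spikes of the untouched suffix.
lemma keyL (r : Int) : ∀ (suf pre : List Int) (lg : Int), 0 ≤ lg → lg.toNat < pre.length →
    pre ≠ [] →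
    (((PySem.List.pyRange (pre.length : Int) ((pre.length + suf.length : Nat) : Int) 1).foldl
        (stepA r) (pre ++ suf, lg)).1).filter (fun t => t ≠ 0)
      = pre.filter (fun t => t ≠ 0) ++ (altLoop r (pre.getD lg.toNat 0) suf).filter (fun t => t ≠ 0) := by
  intro suf
  induction suf with
  | nil =>
    intro pre lg _ _ _
    simp [PySem.List.pyRange_one_eq_nil, altLoop]
  | cons t ts ih =>
    intro pre lg hlg0 hlglt hne
    have hlen : (pre.length : Int) < ((pre.length + (t :: ts).length : Nat) : Int) := by
      simp only [List.length_cons]; push_cast; omega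
    rw [PySem.List.pyRange_one_cons hlen, List.foldl_cons]
    have hpos : 0 < pre.length := List.length_pos_of_ne_nil hne
    have h0' : ((pre.length : Int)) ≠ 0 := by omega
    have hget1 : PySem.List.pyGetD (pre ++ t :: ts) (pre.length : Int) 0 = t := by
      rw [PySem.List.pyGetD_natCast]
      simp [List.getD]
    have hget2 : PySem.List.pyGetD (pre ++ t :: ts) lg 0 = pre.getD lg.toNat 0 := by
      rw [PySem.List.pyGetD_of_nonneg _ _ hlg0]
      simp [List.getD, List.getElem?_append_left hlglt]
    have hstep : stepA r (pre ++ t :: ts, lg) (pre.length : Int)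
        = if t - pre.getD lg.toNat 0 < r then (pre ++ 0 :: ts, lg)
          else (pre ++ t :: ts, (pre.length : Int)) := by
      simp only [stepA, beq_iff_eq, if_neg h0', hget1, hget2]
      split_ifs with h
      · simp
      · rfl
    rw [hstep]
    split_ifs with h
    · -- rejected spike: zeroed in place, lastGood unchanged
      have hrec := ih (pre ++ [0]) lg hlg0 (by simp; omega) (by simp)
      have e1 : pre ++ 0 :: ts = (pre ++ [0]) ++ ts := by simp
      have e2 : (pre.length + (t :: ts).length : Nat) = ((pre ++ [0]).length + ts.length : Nat) := by
        simp; omega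
      have e3 : ((pre.length : Int) + 1) = (((pre ++ [0]).length : Nat) : Int) := by simp
      rw [e1, e2, e3, hrec]
      have hgd : (pre ++ [0]).getD lg.toNat 0 = pre.getD lg.toNat 0 := by
        simp [List.getD, List.getElem?_append_left hlglt]
      have hfil : (pre ++ [0]).filter (fun t => decide (t ≠ 0)) = pre.filter (fun t => decide (t ≠ 0)) := by
        simp
      rw [hgd, hfil]
      conv_rhs => rw [altLoop]
      rw [if_neg (by omega : ¬ r ≤ t - pre.getD lg.toNat 0)]
    · -- accepted spike: lastGood moves to this index
      have hrec := ih (pre ++ [t]) (pre.length : Int) (by positivity) (by simp) (by simp)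
      have e1 : pre ++ t :: ts = (pre ++ [t]) ++ ts := by simp
      have e2 : (pre.length + (t :: ts).length : Nat) = ((pre ++ [t]).length + ts.length : Nat) := by
        simp; omega
      have e3 : ((pre.length : Int) + 1) = (((pre ++ [t]).length : Nat) : Int) := by simp
      rw [e1, e2, e3, hrec]
      have hgd : (pre ++ [t]).getD ((pre.length : Int)).toNat 0 = t := by
        simp [List.getD]
      rw [hgd, List.filter_append]
      conv_rhs => rw [altLoop]
      rw [if_pos (by omega : r ≤ t - pre.getD lg.toNat 0)]
      simp [List.filter_cons]
      split_ifs <;> simp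

-- master lemma: A is B with the zero-valued accepted spikes filtered out
lemma masterL (xs : List Int) (r : Int) :
    reduceByRefractory xs r = (reduceByRefractory_alt xs r).filter (fun t => t ≠ 0) := by
  match xs with
  | [] => rfl
  | t0 :: rest =>
    rw [altB]
    unfold reduceByRefractory
    have h1 : (0 : Int) < (((t0 :: rest).length : Nat) : Int) := by
      simp only [List.length_cons]; push_cast; omega
    rw [PySem.List.pyRange_one_cons h1, List.foldl_cons]
    have h0 : stepA r (t0 :: rest, 0) 0 = (t0 :: rest, 0) := by simp [stepA]
    rw [h0]
    have hk := keyL r rest [t0] 0 le_rfl (by simp) (by simp)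
    have e2 : (([t0] : List Int).length + rest.length : Nat) = rest.length + 1 := by
      simp; omega
    rw [e2] at hk
    norm_num [List.getD] at hk ⊢
    rw [hk, List.filter_cons]
    split_ifs <;> simp_all

-- acceptsZero says exactly that 0 is among the spikes altLoop keeps
lemma acceptsZero_iff (r : Int) : ∀ (ts : List Int) (lg : Int),
    acceptsZero r lg ts = true ↔ (0 : Int) ∈ altLoop r lg ts := by
  intro ts
  induction ts with
  | nil => intro lg; simp [acceptsZero, altLoop]
  | cons t ts ih =>
    intro lg
    rw [acceptsZero, altLoop]
    by_cases h : r ≤ t - lg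
    · rw [if_pos h, if_pos h]
      simp only [Bool.or_eq_true, beq_iff_eq, ih t, List.mem_cons]
      constructor
      · rintro (h1 | h1)
        exacts [Or.inl h1.symm, Or.inr h1]
      · rintro (h1 | h1)
        exacts [Or.inl h1.symm, Or.inr h1]
    · rw [if_neg h, if_neg h, ih lg]

-- D_ says exactly that 0 is among B's output
lemma D_iff_mem (xs : List Int) (r : Int) :
    D_reduceByRefractory xs r ↔ (0 : Int) ∈ reduceByRefractory_alt xs r := by
  unfold D_reduceByRefractory
  match xs with
  | [] => simp [reduceByRefractory_alt]
  | t0 :: rest =>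
    rw [altB]
    simp only [Bool.or_eq_true, beq_iff_eq, acceptsZero_iff, List.mem_cons]
    constructor
    · rintro (h1 | h1)
      exacts [Or.inl h1.symm, Or.inr h1]
    · rintro (h1 | h1)
      exacts [Or.inl h1.symm, Or.inr h1]

-- ===== VERDICT (by name: the statements are the Claim_ definitions above) =====
theorem reduceByRefractory_spec : Claim_unchanged_reduceByRefractory := by
  intro xs r _
  unfold Spec_reduceByRefractory
  intro hD
  rw [masterL]
  refine List.filter_eq_self.mpr ?_
  intro a ha
  simp only [ne_eq, decide_not, Bool.not_eq_eq_eq_not, Bool.not_true, decide_eq_false_iff_not]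
  intro h0
  exact hD ((D_iff_mem xs r).mpr (h0 ▸ ha))

theorem reduceByRefractory_changed : Claim_changed_reduceByRefractory := by
  unfold Claim_changed_reduceByRefractory; decide

theorem reduceByRefractory_tight : Claim_exact_reduceByRefractory := by
  intro xs r _ hD heq
  have hmem : (0 : Int) ∈ reduceByRefractory_alt xs r := (D_iff_mem xs r).mp hD
  rw [masterL] at heq
  have h2 := (List.mem_filter.mp (heq ▸ hmem)).2
  simp at h2
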